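-- pv_equiv track=rewrite | github.com/PaolaG365/PythonCourses | PythonFundamentalsMay2023/5.Lists_advanced/2.Exercises/9.Anonymous_threat.py | divide
-- ===== SOURCE A (Python) =====
-- def divide(words, index, parts):  # divide string at n index into n parts
--     word = [symbol for symbol in words.pop(index)]
--     word_list = []
--
--     if parts > len(word):
--         length_part = 1
--     else:
--         length_part = int(len(word) / parts)
--     starting_index = 0
--
--     for symbol in range(parts):
--         if symbol == parts - 1:
--             word_list.append("".join(word[starting_index:]))
--             break
--         else:
--             word_list.append("".join(word[starting_index:starting_index + length_part]))
--         starting_index += length_part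
--
--     for el in word_list:
--         words.insert(index, el)
--         index += 1
--
--     return words
-- ===== SOURCE B (Python) =====
-- def divide(words, index, parts):
--     # One pass over the popped word: distribute each character into its part's
--     # bucket by index // part_length, then rebuild the list around that position.
--     s = words.pop(index)
--     if parts > len(s):
--         length_part = 1
--     else:
--         length_part = int(len(s) / parts)
--     buckets = [[] for _ in range(parts)]
--     if buckets:
--         for i, ch in enumerate(s):
--             b = i // length_part
--             buckets[min(b, parts - 1)].append(ch)
--     pos = index if index >= 0 else index + len(words) + 1
--     return words[:pos] + ["".join(b) for b in buckets] + words[pos:]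
-- ===== Notes on version B (the rewrite author's own statement) =====
-- stated objective: faster
-- what changed: B replaces A's slice-per-chunk loop (running start index, break on last part) plus the per-element words.insert loop by a single pass over the popped word's characters that scatters each character into its part's bucket by i // part_length, and splices the joined buckets back with one list-slicing step instead of repeated inserts that each shift the list tail.
-- intended difference: For a negative index with parts >= 1 (except index == -len(words) with parts == 1, where they agree), A's words.insert(index+k, chunk) positions are re-interpreted against the growing list, scattering the chunks among the other elements (e.g. (['ab','c'],-1,1) -> ['c','ab']); B splices all chunks contiguously at the position the word was popped from (['ab','c']), which is the function's evident intent. — e.g. on divide(["ab", "c"], -1, 1): A returns ["c", "ab"], B returns ["ab", "c"]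
import Mathlib
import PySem

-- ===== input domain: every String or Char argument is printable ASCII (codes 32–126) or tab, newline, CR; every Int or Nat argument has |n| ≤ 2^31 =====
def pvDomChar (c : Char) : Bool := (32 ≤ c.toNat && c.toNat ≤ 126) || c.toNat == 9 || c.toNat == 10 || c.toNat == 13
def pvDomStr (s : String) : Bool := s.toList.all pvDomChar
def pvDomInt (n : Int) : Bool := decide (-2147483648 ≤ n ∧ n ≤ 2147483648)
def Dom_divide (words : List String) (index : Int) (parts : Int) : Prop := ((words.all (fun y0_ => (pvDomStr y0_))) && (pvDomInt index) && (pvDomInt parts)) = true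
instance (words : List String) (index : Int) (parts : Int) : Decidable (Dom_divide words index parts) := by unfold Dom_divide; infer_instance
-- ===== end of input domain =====

-- B replaces A's slice-per-chunk loop and its per-element insert loop (each insert shifts the
-- list tail) by one pass over the popped word's characters scattering each into its part's
-- bucket, spliced back with one list-slicing step (objective: faster, measured by the timing
-- run). Both Pythons mutate `words` in place (A fully, B only via pop); the equivalence
-- proved here is about the RETURN value only.

-- ===== PORT A =====
-- the 'for symbol in range(parts)' loop with its `break` on the last part
def divideLoopA (word : List Char) (parts length_part : Int) :
    List Int → Int → List String → List String
  | [], _, acc => acc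
  | sym :: rest, starting_index, acc =>
    if sym = parts - 1 then
      -- append the tail slice, then `break`
      acc ++ [String.ofList (PySem.List.slice word (some starting_index) none)]
    else
      divideLoopA word parts length_part rest (starting_index + length_part)
        (acc ++ [String.ofList (PySem.List.slice word (some starting_index)
                   (some (starting_index + length_part)))])

def divide (words : List String) (index : Int) (parts : Int) : List String :=
  match PySem.List.pop? words index with
  | none => []   -- IndexError from words.pop(index); excluded by Pre_divide
  | some (w, popped) =>
    -- word = [symbol for symbol in …]; "".join of 1-char strings is String.ofList (exact)
    let word : List Char := w.toList
    -- int(len/parts) truncates toward zero; exact at Dom magnitudes for the parts ≥ 1 inputs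
    -- where it is used. parts = 0 (ZeroDivisionError) is excluded by Pre_divide.
    let length_part : Int := if parts > (word.length : Int) then 1 else (word.length : Int) / parts
    let word_list := divideLoopA word parts length_part (PySem.List.pyRange 0 parts 1) 0 []
    (word_list.foldl (fun (st : List String × Int) el =>
        (PySem.List.insert st.1 st.2 el, st.2 + 1)) (popped, index)).1

-- ===== PORT B =====
-- loop body: buckets[min(i // length_part, parts - 1)].append(ch)
def distStep (length_part last : Int) (bs : List (List Char)) (q : Int × Char) : List (List Char) :=
  let b := min (PySem.Int.floordiv q.1 length_part) last
  -- the index b is always in range here (0 ≤ b ≤ last < len bs), so pySetD/pyGetD are exact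
  PySem.List.pySetD bs b (PySem.List.pyGetD bs b [] ++ [q.2])

def divide_alt (words : List String) (index : Int) (parts : Int) : List String :=
  match PySem.List.pop? words index with
  | none => []   -- IndexError; excluded by Pre_divide
  | some (s, popped) =>
    let n : Int := PySem.Str.len s
    let length_part : Int := if parts > n then 1 else n / parts  -- int(len(s)/parts), see port A
    let buckets0 : List (List Char) := (PySem.List.pyRange 0 parts 1).map (fun _ => [])
    let buckets : List (List Char) :=
      if buckets0 = [] then buckets0
      else (PySem.List.enumerate s.toList 0).foldl (distStep length_part (parts - 1)) buckets0
    let pos : Int := if 0 ≤ index then index else index + (popped.length : Int) + 1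
    PySem.List.slice popped none (some pos) ++ buckets.map String.ofList
      ++ PySem.List.slice popped (some pos) none

-- ===== PRECONDITION & SPEC =====
-- A raises IndexError when index is out of range for words.pop and ZeroDivisionError when parts = 0.
def Pre_divide (words : List String) (index : Int) (parts : Int) : Prop :=
  parts ≠ 0 ∧ PySem.Raise.InRange words.length index
instance (words : List String) (index : Int) (parts : Int) : Decidable (Pre_divide words index parts) := by unfold Pre_divide; infer_instance
def pvWitness_divide : List String × Int × Int := (["abcde", "xy"], 0, 2)

-- For a negative index with parts >= 1 (except index = -len(words) with parts = 1, where the two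
-- agree), A's words.insert(index+k, chunk) positions are re-interpreted against the growing list,
-- scattering the chunks among the other elements; B splices all chunks contiguously at the
-- position the word was popped from, the function's evident intent.
def D_divide (words : List String) (index : Int) (parts : Int) : Prop :=
  index < 0 ∧ 1 ≤ parts ∧ ¬(index + (words.length : Int) = 0 ∧ parts = 1)
instance (words : List String) (index : Int) (parts : Int) : Decidable (D_divide words index parts) := by unfold D_divide; infer_instance
def Spec_divide (words : List String) (index : Int) (parts : Int) (out : List String) : Prop :=
  ¬ D_divide words index parts → out = divide_alt words index parts
instance (words : List String) (index : Int) (parts : Int) (out : List String) : Decidable (Spec_divide words index parts out) := by unfold Spec_divide; infer_instance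

def pvDiffWitness_divide : List String × Int × Int := (["ab", "c"], -1, 1)
def pvDiffWitnessOut_divide : (List String) × (List String) := (["c", "ab"], ["ab", "c"])

-- ===== CLAIM (what is proved, stated in full; the proofs are below) =====
def Claim_unchanged_divide : Prop := ∀ (words : List String) (index : Int) (parts : Int), Dom_divide words index parts → Pre_divide words index parts → Spec_divide words index parts (divide words index parts)
def Claim_changed_divide : Prop := Dom_divide (pvDiffWitness_divide.1) (pvDiffWitness_divide.2.1) (pvDiffWitness_divide.2.2) ∧ Pre_divide (pvDiffWitness_divide.1) (pvDiffWitness_divide.2.1) (pvDiffWitness_divide.2.2) ∧ D_divide (pvDiffWitness_divide.1) (pvDiffWitness_divide.2.1) (pvDiffWitness_divide.2.2) ∧ divide (pvDiffWitness_divide.1) (pvDiffWitness_divide.2.1) (pvDiffWitness_divide.2.2) = pvDiffWitnessOut_divide.1 ∧ divide_alt (pvDiffWitness_divide.1) (pvDiffWitness_divide.2.1) (pvDiffWitness_divide.2.2) = pvDiffWitnessOut_divide.2 ∧ pvDiffWitnessOut_divide.1 ≠ pvDiffWitnessOut_divide.2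

-- ===== LEMMAS AND PROOFS =====

-- a list is the concatenation of its two halves at any nonnegative split point
theorem slice_split (xs : List String) (p : Int) (hp : 0 ≤ p) :
    PySem.List.slice xs none (some p) ++ PySem.List.slice xs (some p) none = xs := by
  rw [PySem.List.slice_to xs hp, PySem.List.slice_from xs hp, List.take_append_drop]

-- list.insert at an index clamped below 0 prepends
theorem insert_clamp_zero {α : Type} (xs : List α) (i : Int) (v : α)
    (hneg : i < 0) (h : i + (xs.length : Int) ≤ 0) : PySem.List.insert xs i v = v :: xs := by
  simp only [PySem.List.insert, PySem.List.sliceIndices]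
  rw [if_pos hneg]
  have h0 : (max (i + (xs.length : Int)) (if (1:Int) < 0 then -1 else 0)) = 0 := by
    split_ifs <;> omega
  rw [h0]
  simp

-- list.pop(-len) pops the head
theorem pop?_neg_len {α : Type} (x : α) (xs : List α) :
    PySem.List.pop? (x :: xs) (-(((x :: xs).length : Nat) : Int)) = some (x, xs) := by
  unfold PySem.List.pop? PySem.List.pyIdx?
  rw [if_neg (by simp; omega), if_pos (by omega)]
  have h0 : ((x :: xs).length - (-(-(((x :: xs).length : Nat) : Int))).toNat) = 0 := by simp
  rw [h0]
  simp

-- the A chunk loop, characterised by index arithmetic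
theorem divideLoopA_eq (word : List Char) (parts lp : Int) :
    ∀ (k : Nat) (j : Int) (acc : List String), 0 ≤ j → j + k = parts - 1 →
    divideLoopA word parts lp (PySem.List.pyRange j parts 1) (j * lp) acc =
      acc ++ (PySem.List.pyRange j (parts - 1) 1).map
        (fun i => String.ofList (PySem.List.slice word (some (i * lp)) (some ((i + 1) * lp))))
      ++ [String.ofList (PySem.List.slice word (some ((parts - 1) * lp)) none)] := by
  intro k
  induction k with
  | zero =>
    intro j acc hj hsum
    have hj' : j = parts - 1 := by omega
    rw [PySem.List.pyRange_one_cons (by omega : j < parts)]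
    rw [PySem.List.pyRange_one_eq_nil (by omega : parts - 1 ≤ j)]
    simp [divideLoopA, hj']
  | succ k ih =>
    intro j acc hj hsum
    have hlt : j < parts - 1 := by omega
    rw [PySem.List.pyRange_one_cons (by omega : j < parts)]
    rw [PySem.List.pyRange_one_cons hlt]
    simp only [divideLoopA, if_neg (by omega : ¬ j = parts - 1)]
    have hmul : j * lp + lp = (j + 1) * lp := by ring
    rw [hmul, ih (j + 1) _ (by omega) (by omega)]
    simp [List.append_assoc]

-- the A insert loop at a nonnegative in-range position is a slice splice
theorem insert_fold_eq (chunks : List String) :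
    ∀ (rest : List String) (j : Nat), j ≤ rest.length →
    (chunks.foldl (fun (st : List String × Int) el =>
        (PySem.List.insert st.1 st.2 el, st.2 + 1)) (rest, (j : Int))).1
      = rest.take j ++ chunks ++ rest.drop j := by
  induction chunks with
  | nil => intro rest j hj; simp
  | cons el t ih =>
    intro rest j hj
    simp only [List.foldl_cons]
    rw [PySem.List.insert_natCast rest j el hj]
    have hcast : (j : Int) + 1 = ((j + 1 : Nat) : Int) := by push_cast; ring
    rw [hcast, ih (rest.take j ++ el :: rest.drop j) (j + 1)
      (by simp; omega)]
    have hTlen : (rest.take j).length = j := by simp [Nat.min_eq_left hj]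
    have h1 : j + 1 - j = 1 := by omega
    have htk : (rest.take j ++ el :: rest.drop j).take (j + 1) = rest.take j ++ [el] := by
      rw [List.take_append, hTlen, h1, List.take_of_length_le (by rw [hTlen]; omega)]
      simp
    have hdr : (rest.take j ++ el :: rest.drop j).drop (j + 1) = rest.drop j := by
      rw [List.drop_append, hTlen, h1, List.drop_of_length_le (by rw [hTlen]; omega)]
      simp
    rw [htk, hdr]
    simp [List.append_assoc]

def chunksNat (w : List Char) (P L : Nat) : List (List Char) :=
  (List.range (P - 1)).map (fun k => ((w.drop (k * L)).take L)) ++ [w.drop ((P - 1) * L)]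

theorem length_chunksNat (w : List Char) (P L : Nat) (hP : 1 ≤ P) :
    (chunksNat w P L).length = P := by
  unfold chunksNat; simp; omega

theorem chunk_update (u : List Char) (c : Char) (P L : Nat) (hP : 1 ≤ P) (hL : 1 ≤ L) :
    (chunksNat u P L).set (min (u.length / L) (P - 1))
        ((chunksNat u P L).getD (min (u.length / L) (P - 1)) [] ++ [c])
      = chunksNat (u ++ [c]) P L := by
  set m := u.length with hm
  set k : Nat := min (m / L) (P - 1) with hk
  have hdm : L * (m / L) + m % L = m := Nat.div_add_mod m L
  have hmod : m % L < L := Nat.mod_lt m (by omega)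
  have hkP : k < P := by omega
  have hklt : k < (chunksNat u P L).length := by rw [length_chunksNat u P L hP]; exact hkP
  rw [List.getD_eq_getElem _ _ hklt]
  have hgetm : ∀ (v : List Char) (j : Nat) (hj : j < (chunksNat v P L).length),
      (chunksNat v P L)[j] = if j < P - 1 then (v.drop (j * L)).take L
        else v.drop ((P - 1) * L) := by
    intro v j hj
    have hjP : j < P := by rw [length_chunksNat v P L hP] at hj; exact hj
    unfold chunksNat
    by_cases h : j < P - 1
    · rw [List.getElem_append_left (by simpa using h)]
      simp [h]
    · have hj' : j = P - 1 := by omega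
      rw [List.getElem_append_right (by simpa using h)]
      simp [hj']
  apply List.ext_getElem
  · rw [List.length_set, length_chunksNat _ _ _ hP, length_chunksNat _ _ _ hP]
  intro j hj1 hj2
  have hjP : j < P := by rw [List.length_set, length_chunksNat _ _ _ hP] at hj1; exact hj1
  rw [List.getElem_set]
  rw [hgetm (u ++ [c]) j (by rwa [length_chunksNat _ _ _ hP])]
  have hju : j < (chunksNat u P L).length := by rwa [length_chunksNat _ _ _ hP]
  by_cases hjk : k = j
  · rw [if_pos hjk, hgetm u k hklt, ← hjk]
    by_cases hs : k < P - 1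
    · have hjdiv : k = m / L := by omega
      have hle : k * L ≤ m := by
        calc k * L = (m / L) * L := by rw [hjdiv]
        _ ≤ m := Nat.div_mul_le_self m L
      have hlt2 : m < k * L + L := by
        have h1 : k * L = (m / L) * L := by rw [hjdiv]
        have h2 : (m / L) * L = L * (m / L) := Nat.mul_comm _ _
        omega
      rw [if_pos hs, List.drop_append_of_le_length (by omega)]
      have hvl : (u.drop (k * L)).length = m - k * L := by simp [← hm]
      have t1 : (u.drop (k * L) ++ [c]).take L = u.drop (k * L) ++ [c] := by
        apply List.take_of_length_le
        simp only [List.length_append, List.length_cons, List.length_nil, hvl]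
        omega
      have t2 : (u.drop (k * L)).take L = u.drop (k * L) := by
        apply List.take_of_length_le
        rw [hvl]; omega
      rw [t1, t2, if_pos hs]
    · -- last bucket: k = P - 1, so (P-1)*L ≤ m
      have hge : P - 1 ≤ m / L := by omega
      have hle2 : (P - 1) * L ≤ m := by
        calc (P - 1) * L ≤ (m / L) * L := Nat.mul_le_mul hge (le_refl L)
        _ ≤ m := Nat.div_mul_le_self m L
      simp only [if_neg hs]
      rw [List.drop_append_of_le_length (by omega)]
  · rw [if_neg hjk, hgetm u j hju]
    by_cases hs : j < P - 1
    · -- j ≠ m / L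
      have hjne : j ≠ m / L := by omega
      simp only [if_pos hs]
      rcases Nat.lt_or_ge j (m / L) with hlt | hge
      · -- chunk j already full: j*L + L ≤ m
        have hfull : j * L + L ≤ m := by
          calc j * L + L = (j + 1) * L := by ring
          _ ≤ (m / L) * L := Nat.mul_le_mul hlt (le_refl L)
          _ ≤ m := Nat.div_mul_le_self m L
        rw [List.drop_append_of_le_length (by omega)]
        rw [List.take_append_of_le_length (by rw [List.length_drop]; omega)]
      · -- chunk j not yet reached: m < j*L
        have hgt : m < j * L := by
          rcases Nat.lt_or_ge j (m / L + 1) with h | h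
          · omega
          · calc m < L * (m / L) + L := by omega
            _ = (m / L + 1) * L := by ring
            _ ≤ j * L := Nat.mul_le_mul h (le_refl L)
        rw [List.drop_eq_nil_of_le (show u.length ≤ j * L by omega)]
        rw [List.drop_eq_nil_of_le (show (u ++ [c]).length ≤ j * L by simp; omega)]
    · -- j = P - 1 ≠ k, so m / L < P - 1 and m < (P-1)*L
      have hmlt : m / L < P - 1 := by omega
      have hgt : m < (P - 1) * L := by
        calc m < L * (m / L) + L := by omega
        _ = (m / L + 1) * L := by ring
        _ ≤ (P - 1) * L := Nat.mul_le_mul hmlt (le_refl L)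
      simp only [if_neg hs]
      rw [List.drop_eq_nil_of_le (show u.length ≤ (P - 1) * L by omega)]
      rw [List.drop_eq_nil_of_le (show (u ++ [c]).length ≤ (P - 1) * L by simp; omega)]


theorem pyRange_map_const_nil (P : Nat) :
    (PySem.List.pyRange 0 (P : Nat) 1).map (fun _ => ([] : List Char)) = List.replicate P [] := by
  rw [PySem.List.pyRange_zero_natCast, List.map_map]
  induction P with
  | zero => simp
  | succ n ih => rw [List.range_succ, List.map_append, ih, List.replicate_succ']; simp

theorem dist_fold_eq (w : List Char) (P L : Nat) (hP : 1 ≤ P) (hL : 1 ≤ L) :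
    ∀ (m : Nat), m ≤ w.length →
    (PySem.List.enumerate (w.take m) 0).foldl (distStep (L : Int) ((P : Int) - 1))
        ((PySem.List.pyRange 0 (P : Int) 1).map (fun _ => ([] : List Char)))
      = chunksNat (w.take m) P L := by
  intro m
  induction m with
  | zero =>
    intro _
    rw [pyRange_map_const_nil]
    unfold chunksNat
    simp only [List.take_zero, PySem.List.enumerate, List.foldl_nil, List.drop_nil, List.take_nil]
    rw [show P = (P - 1) + 1 from by omega, List.replicate_succ']
    have : P - 1 + 1 - 1 = P - 1 := by omega
    rw [this]
    simp [List.map_const']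
  | succ m ih =>
    intro hm
    have hm' : m ≤ w.length := by omega
    have hlt : m < w.length := by omega
    have htake : w.take (m + 1) = w.take m ++ [w[m]] := by
      rw [List.take_add_one]
      simp [List.getElem?_eq_getElem hlt]
    have hlen : (w.take m).length = m := by simp [Nat.min_eq_left hm']
    rw [htake, PySem.List.enumerate_append, List.foldl_append, ih hm']
    simp only [PySem.List.enumerate, hlen]
    rw [List.foldl_cons, List.foldl_nil]
    unfold distStep
    dsimp only
    have hdiv : PySem.Int.floordiv ((0 : Int) + (m : Nat)) (L : Int) = ((m / L : Nat) : Int) := by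
      rw [show ((0 : Int) + ((m : Nat) : Int)) = ((m : Nat) : Int) by ring]
      exact PySem.Int.floordiv_natCast m L
    have hc1 : ((P : Int) - 1) = ((P - 1 : Nat) : Int) := by omega
    rw [hdiv, hc1, ← Nat.cast_min, PySem.List.pySetD_natCast, PySem.List.pyGetD_natCast]
    have key := chunk_update (w.take m) w[m] P L hP hL
    rw [hlen] at key
    exact key

-- A's chunk strings are the Nat-form chunks, mapped through "".join
theorem chunksA_eq_chunksNat (w : List Char) (P L : Nat) (hP : 1 ≤ P) :
    (PySem.List.pyRange 0 (((P : Nat) : Int) - 1) 1).map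
        (fun i => String.ofList (PySem.List.slice w (some (i * (L : Int)))
          (some ((i + 1) * (L : Int)))))
      ++ [String.ofList (PySem.List.slice w (some ((((P : Nat) : Int) - 1) * (L : Int))) none)]
      = (chunksNat w P L).map String.ofList := by
  have hc : (((P : Nat) : Int) - 1) = ((P - 1 : Nat) : Int) := by omega
  rw [hc, PySem.List.pyRange_zero_natCast]
  unfold chunksNat
  rw [List.map_append, List.map_map, List.map_map]
  congr 1
  · apply List.map_congr_left
    intro k _
    have h1 : ((k : Int) * (L : Int)) = (((k * L : Nat)) : Int) := by push_cast; ring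
    have h2 : (((k : Int) + 1) * (L : Int)) = (((k * L + L : Nat)) : Int) := by push_cast; ring
    simp only [Function.comp_apply, h1, h2, PySem.List.slice_natCast]
    congr 2
    omega
  · have h3 : (((P - 1 : Nat) : Int) * (L : Int)) = ((((P - 1) * L : Nat)) : Int) := by
      push_cast; ring
    rw [h3, PySem.List.slice_from_natCast]
    simp

-- ===== VERDICT (by name: the statement is the Claim_ definition above) =====
theorem divide_spec : Claim_unchanged_divide := by
  intro words index parts hDom hPre hnD
  obtain ⟨hp0, hir⟩ := hPre
  have hir' : -(words.length : Int) ≤ index ∧ index < (words.length : Int) := by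
    simpa [PySem.Raise.InRange] using hir
  show divide words index parts = divide_alt words index parts
  unfold divide divide_alt
  cases hpop : PySem.List.pop? words index with
  | none => rfl
  | some pr =>
    obtain ⟨w, rest⟩ := pr
    have hlen : rest.length + 1 = words.length := PySem.List.length_of_pop?_eq_some words hpop
    dsimp only
    rw [PySem.Str.len_eq]
    by_cases hneg : parts < 0
    · -- parts < 0: no chunks on either side; both return the popped list
      rw [PySem.List.pyRange_one_eq_nil (by omega : parts ≤ 0)]
      have hpos0 : (0:Int) ≤ if 0 ≤ index then index else index + (rest.length : Int) + 1 := by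
        split_ifs with h
        · exact h
        · omega
      simp only [divideLoopA, List.foldl_nil, List.map_nil, if_true, List.append_nil]
      exact (slice_split rest _ hpos0).symm
    · have hpos1 : 1 ≤ parts := by omega
      -- the two length_part expressions are identical, and at least 1
      set lp : Int := if parts > (w.toList.length : Int) then 1
        else (w.toList.length : Int) / parts with hlpdef
      have hlp1 : 1 ≤ lp := by
        rw [hlpdef]
        split_ifs with h
        · omega
        · rw [Int.le_ediv_iff_mul_le (by omega : (0:Int) < parts)]
          omega
      set P : Nat := parts.toNat with hPdef
      set L : Nat := lp.toNat with hLdef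
      have hPc : parts = ((P : Nat) : Int) := by omega
      have hLc : lp = ((L : Nat) : Int) := by omega
      have hP1 : 1 ≤ P := by omega
      have hL1 : 1 ≤ L := by omega
      -- A's chunk loop yields the Nat-form chunks
      have hloop := divideLoopA_eq w.toList parts lp (parts - 1).toNat 0 [] le_rfl (by omega)
      rw [zero_mul] at hloop
      have hchunksA : divideLoopA w.toList parts lp (PySem.List.pyRange 0 parts 1) 0 []
          = (chunksNat w.toList P L).map String.ofList := by
        rw [hloop]
        rw [List.nil_append, hPc, hLc]
        exact chunksA_eq_chunksNat w.toList P L hP1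
      -- B's bucket fold yields the same chunks
      have hbuck0 : ((PySem.List.pyRange 0 parts 1).map (fun _ => ([] : List Char))) ≠ [] := by
        rw [PySem.List.pyRange_one_cons (by omega : (0:Int) < parts)]
        simp
      rw [if_neg hbuck0]
      have hfold : (PySem.List.enumerate w.toList 0).foldl (distStep lp (parts - 1))
            ((PySem.List.pyRange 0 parts 1).map (fun _ => ([] : List Char)))
          = chunksNat w.toList P L := by
        have h := dist_fold_eq w.toList P L hP1 hL1 w.toList.length le_rfl
        rw [List.take_length] at h
        rw [hPc, hLc]
        exact h
      rw [hchunksA, hfold]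
      by_cases hinn : 0 ≤ index
      · -- nonnegative index: both splice at index
        have hidx : index = ((index.toNat : Nat) : Int) := by omega
        have hjle : index.toNat ≤ rest.length := by omega
        rw [if_pos hinn, PySem.List.slice_to rest hinn, PySem.List.slice_from rest hinn]
        rw [hidx, insert_fold_eq _ rest index.toNat hjle]
        simp [max_eq_left hinn]
      · -- index < 0 with 1 ≤ parts: outside D_ only when index = -len(words) and parts = 1
        have hag : index + (words.length : Int) = 0 ∧ parts = 1 := by
          by_contra hq
          exact hnD ⟨by omega, hpos1, hq⟩
        obtain ⟨hsum, rfl⟩ := hag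
        rcases words with _ | ⟨x, xs⟩
        · simp at hir'; omega
        · have hidx : index = -((((x :: xs).length : Nat)) : Int) := by
            simp at hsum ⊢; omega
          rw [hidx, pop?_neg_len] at hpop
          simp only [Option.some.injEq, Prod.mk.injEq] at hpop
          obtain ⟨hw, hr⟩ := hpop
          subst hw
          subst hr
          -- one part: the single chunk is the whole word
          have hchunks : chunksNat x.toList P L = [x.toList] := by
            unfold chunksNat
            have : P - 1 = 0 := by omega
            rw [this]
            simp
          rw [hchunks]
          have hpos : (if 0 ≤ index then index
              else index + ((xs.length : Nat) : Int) + 1) = 0 := by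
            rw [if_neg hinn]
            omega
          rw [hpos, PySem.List.slice_to xs (by omega), PySem.List.slice_from xs (by omega)]
          simp only [List.map_cons, List.map_nil, List.foldl_cons, List.foldl_nil]
          rw [insert_clamp_zero xs index (String.ofList x.toList) (by omega) (by omega)]
          simp

theorem divide_changed : Claim_changed_divide := by unfold Claim_changed_divide; decide
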